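-- pv_equiv track=rewrite | github.com/namu00/VerilogHDL-TB_Generator | tv_gen.py | wave_interpreter
-- ===== SOURCE A (Python) =====
-- def wave_interpreter(name, data):
--     high = "1hHu"
--     low = "0lLd"
--     bus = "="
--
--     tab = "    "
--     sig_info = [data[0]]
--     ret_string = ""
--
--     for i in range(1,len(data)):
--         if data[i] == '.': sig_info.append(sig_info[(i - 1)])
--         else: sig_info.append(data[i])
--
--     for c in sig_info:
--         ret_string += (tab + tab) #indentation
--         if c in high:
--             ret_string += (name + " = 1'b1; #2;\n")
--         else:
--             ret_string += (name + " = 1'b0; #2;\n")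
--
--     return ret_string
-- ===== SOURCE B (Python) =====
-- def wave_interpreter(name, data):
--     high = "1hHu"
--     prev = data[0]  # same IndexError as A on empty input
--     lines = []
--     for c in data:
--         if c != '.':
--             prev = c
--         lines.append("        " + name + (" = 1'b1; #2;\n" if prev in high else " = 1'b0; #2;\n"))
--     return "".join(lines)
-- ===== Notes on version B (the rewrite author's own statement) =====
-- stated objective: simpler
-- what changed: Drops the materialised forward-filled sig_info list and its second rendering loop: a single pass over data keeps one scalar 'prev' and emits each line immediately, joining at the end.
import Mathlib
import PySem

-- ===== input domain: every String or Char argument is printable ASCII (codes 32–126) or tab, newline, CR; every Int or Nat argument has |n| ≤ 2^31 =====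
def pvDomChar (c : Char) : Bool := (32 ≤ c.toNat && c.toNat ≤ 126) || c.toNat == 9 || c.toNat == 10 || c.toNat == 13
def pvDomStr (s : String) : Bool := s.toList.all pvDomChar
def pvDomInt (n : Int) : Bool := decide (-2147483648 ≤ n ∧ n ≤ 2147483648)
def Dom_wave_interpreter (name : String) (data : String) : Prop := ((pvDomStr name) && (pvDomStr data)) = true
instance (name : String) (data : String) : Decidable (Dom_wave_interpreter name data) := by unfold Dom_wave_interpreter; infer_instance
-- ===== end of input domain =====

-- B keeps a scalar running 'prev' in one pass instead of A's forward-filled list plus second loop (objective: simpler).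
-- ===== PORT A =====
-- literal port of A; strings are handled as List Char (PySem.Chars domain), result rebuilt with String.mk
def wave_interpreter (name : String) (data : String) : String :=
  let high := "1hHu".toList
  let tab := "    ".toList
  let cs := data.toList
  -- data[0]: IndexError on empty data, excluded by Pre_
  let sig_info : List Char := [PySem.List.pyGetD cs 0 ' ']
  let sig_info := (PySem.List.pyRange 1 (cs.length : Int) 1).foldl
    (fun si i =>
      if PySem.List.pyGetD cs i ' ' = '.' then si ++ [PySem.List.pyGetD si (i - 1) ' ']
      else si ++ [PySem.List.pyGetD cs i ' ']) sig_info
  let ret := sig_info.foldl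
    (fun r c =>
      let r := r ++ tab ++ tab
      if c ∈ high then r ++ name.toList ++ " = 1'b1; #2;\n".toList
      else r ++ name.toList ++ " = 1'b0; #2;\n".toList) []
  String.mk ret

-- ===== PORT B =====
-- literal port of Source B: one pass, scalar prev, ''.join = flatten
def wave_interpreter_alt (name : String) (data : String) : String :=
  let high := "1hHu".toList
  let cs := data.toList
  let st := cs.foldl
    (fun (st : List (List Char) × Char) c =>
      let prev := if c ≠ '.' then c else st.2
      (st.1 ++ ["        ".toList ++ name.toList ++
        (if prev ∈ high then " = 1'b1; #2;\n".toList else " = 1'b0; #2;\n".toList)], prev))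
    ([], PySem.List.pyGetD cs 0 ' ')
  String.mk st.1.flatten

-- ===== PRECONDITION & SPEC =====
-- A raises IndexError on data = "" (data[0]); Pre_ excludes exactly that input.
def Pre_wave_interpreter (name : String) (data : String) : Prop := data ≠ ""
instance (name : String) (data : String) : Decidable (Pre_wave_interpreter name data) := by
  unfold Pre_wave_interpreter; infer_instance
def pvWitness_wave_interpreter : String × String := ("clk", "1.0.h")

def Spec_wave_interpreter (name : String) (data : String) (out : String) : Prop := out = wave_interpreter_alt name data
instance (name : String) (data : String) (out : String) : Decidable (Spec_wave_interpreter name data out) := by unfold Spec_wave_interpreter; infer_instance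

-- ===== CLAIM (what is proved, stated in full; the proofs are below) =====
def Claim_equal_wave_interpreter : Prop := ∀ (name : String) (data : String), Dom_wave_interpreter name data → Pre_wave_interpreter name data → Spec_wave_interpreter name data (wave_interpreter name data)

-- ===== LEMMAS AND PROOFS =====

-- the common forward-fill sequence
def pvFF (p : Char) : List Char → List Char
  | [] => []
  | c :: rest => let q := if c = '.' then p else c; q :: pvFF q rest

-- one output line for a filled value
def pvLine (name : List Char) (c : Char) : List Char :=
  "        ".toList ++ name ++
    (if c ∈ "1hHu".toList then " = 1'b1; #2;\n".toList else " = 1'b0; #2;\n".toList)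

theorem pvGetD_last {si : List Char} (h : si ≠ []) (d : Char) :
    PySem.List.pyGetD si ((si.length : Int) - 1) d = si.getLast h := by
  have h1 : (1 : Int) ≤ si.length := by
    have := List.length_pos_iff.mpr h; omega
  rw [show ((si.length : Int) - 1) = ((si.length - 1 : Nat) : Int) by omega]
  rw [PySem.List.pyGetD_natCast]
  rw [List.getD_eq_getElem _ _ (by have := List.length_pos_iff.mpr h; omega)]
  exact (List.getLast_eq_getElem h).symm

theorem pvFillA (cs : List Char) :
    ∀ (rest pre si : List Char) (h : si ≠ []),
      cs = pre ++ rest → si.length = pre.length →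
      (PySem.List.pyRange (pre.length : Int) ((pre.length : Int) + rest.length) 1).foldl
        (fun si i =>
          if PySem.List.pyGetD cs i ' ' = '.' then si ++ [PySem.List.pyGetD si (i - 1) ' ']
          else si ++ [PySem.List.pyGetD cs i ' ']) si
      = si ++ pvFF (si.getLast h) rest := by
  intro rest
  induction rest with
  | nil =>
    intro pre si h hcs hlen
    simp [PySem.List.pyRange_one_eq_nil, pvFF]
  | cons c rest ih =>
    intro pre si h hcs hlen
    have hlt : (pre.length : Int) < (pre.length : Int) + (c :: rest).length := by
      simp only [List.length_cons]; push_cast; omega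
    rw [PySem.List.pyRange_one_cons hlt]
    simp only [List.foldl_cons]
    have hget : PySem.List.pyGetD cs (pre.length : Int) ' ' = c := by
      subst hcs
      simp [PySem.List.pyGetD, PySem.List.pyGet?_append_length]
    have hprev : PySem.List.pyGetD si ((pre.length : Int) - 1) ' ' = si.getLast h := by
      rw [← hlen, pvGetD_last h]
    set q : Char := if c = '.' then si.getLast h else c with hq
    have hstep :
        (if PySem.List.pyGetD cs (pre.length : Int) ' ' = '.' then
            si ++ [PySem.List.pyGetD si ((pre.length : Int) - 1) ' ']
          else si ++ [PySem.List.pyGetD cs (pre.length : Int) ' ']) = si ++ [q] := by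
      rw [hget, hprev, hq]
      by_cases hc : c = '.' <;> simp [hc]
    rw [hstep]
    have h' : si ++ [q] ≠ [] := by simp
    have heq := ih (pre ++ [c]) (si ++ [q]) h'
      (by simpa using hcs) (by simp [hlen])
    have hrange : PySem.List.pyRange ((pre.length : Int) + 1) ((pre.length : Int) + (c :: rest).length) 1
        = PySem.List.pyRange ((pre ++ [c]).length : Int) (((pre ++ [c]).length : Int) + rest.length) 1 := by
      congr 1 <;> (simp only [List.length_cons, List.length_append, List.length_nil] <;> push_cast <;> omega)
    rw [hrange, heq]
    have hlast : (si ++ [q]).getLast h' = q := by simp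
    rw [hlast]
    simp only [pvFF]
    rw [← hq]
    simp

theorem pvRenderA (name : List Char) :
    ∀ (sigs acc : List Char),
      sigs.foldl
        (fun r c =>
          let r := r ++ "    ".toList ++ "    ".toList
          if c ∈ "1hHu".toList then r ++ name ++ " = 1'b1; #2;\n".toList
          else r ++ name ++ " = 1'b0; #2;\n".toList) acc
      = acc ++ (sigs.map (pvLine name)).flatten := by
  intro sigs
  induction sigs with
  | nil => simp
  | cons c rest ih =>
    intro acc
    simp only [List.foldl_cons, List.map_cons, List.flatten_cons, ih]
    unfold pvLine
    have h8 : "    ".toList ++ "    ".toList = ("        ".toList : List Char) := by decide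
    split <;> simp [List.append_assoc, ← h8]

theorem pvScanB (name : List Char) :
    ∀ (cs : List Char) (p : Char) (acc : List (List Char)),
      (cs.foldl
        (fun (st : List (List Char) × Char) c =>
          let prev := if c ≠ '.' then c else st.2
          (st.1 ++ ["        ".toList ++ name ++
            (if prev ∈ "1hHu".toList then " = 1'b1; #2;\n".toList else " = 1'b0; #2;\n".toList)], prev))
        (acc, p)).1
      = acc ++ (pvFF p cs).map (pvLine name) := by
  intro cs
  induction cs with
  | nil => simp [pvFF]
  | cons c rest ih =>
    intro p acc
    simp only [List.foldl_cons]
    have hprev : (if c ≠ '.' then c else p) = (if c = '.' then p else c) := by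
      by_cases hc : c = '.' <;> simp [hc]
    rw [hprev]
    rw [ih]
    simp [pvFF, pvLine]

theorem pvFF_head (c : Char) (rest : List Char) :
    pvFF c (c :: rest) = c :: pvFF c rest := by
  by_cases hc : c = '.' <;> simp [pvFF, hc]

-- ===== VERDICT (by name: the statement is the Claim_ definition above) =====
theorem wave_interpreter_spec : Claim_equal_wave_interpreter := by
  intro name data _ hpre
  unfold Spec_wave_interpreter wave_interpreter wave_interpreter_alt
  have hne : data.toList ≠ [] := by
    simpa using hpre
  obtain ⟨c0, rest, hcs⟩ := List.exists_cons_of_ne_nil hne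
  simp only [hcs]
  have hget0 : PySem.List.pyGetD (c0 :: rest) 0 ' ' = c0 := by
    simp [PySem.List.pyGetD, PySem.List.pyGet?_zero_cons]
  rw [hget0]
  have hfill := pvFillA (c0 :: rest) rest [c0] [c0] (by simp) (by simp) (by simp)
  have hrange : PySem.List.pyRange 1 (((c0 :: rest).length : Int)) 1
      = PySem.List.pyRange ((([c0] : List Char).length : Int)) ((([c0] : List Char).length : Int) + (rest.length : Int)) 1 := by
    congr 1 <;> simp <;> omega
  have hlast : ([c0] : List Char).getLast (by simp) = c0 := by simp
  rw [hrange, hfill, hlast]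
  rw [pvRenderA name.toList (([c0] ++ pvFF c0 rest)) []]
  rw [pvScanB name.toList (c0 :: rest) c0 []]
  rw [pvFF_head]
  simp
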